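-- pv_equiv track=rewrite | github.com/achille-bsc/NSI | Projet Naissance.py | switch_week_days
-- ===== SOURCE A (Python) =====
-- def switch_week_days(actual_day, switch_size) -> str :
--     """
--     Cette fonction permet de passer d'un jour à l'autre en utilisant un décalage d'un certain nombre de jours.
--
--     Args:
--         actual_day (str): le jour de départ.
--         switch_size (int): le nombre de jours de décalage.
--
--     Returns:
--         str: le jour correspondant au décalage par rapport au jour de départ.
--     """
--     while (switch_size > 0):
--         if (actual_day == "Lundi" and switch_size >= 1):
--             actual_day = "Mardi"
--             switch_size -= 1
--         elif (actual_day == "Mardi" and switch_size >= 1):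
--             actual_day = "Mercredi"
--             switch_size -= 1
--         elif (actual_day == "Mercredi" and switch_size >= 1):
--             actual_day = "Jeudi"
--             switch_size -= 1
--         elif (actual_day == "Jeudi" and switch_size >= 1):
--             actual_day = "Vendredi"
--             switch_size -= 1
--         elif (actual_day == "Vendredi" and switch_size >= 1):
--             actual_day = "Samedi"
--             switch_size -= 1
--         elif (actual_day == "Samedi" and switch_size >= 1):
--             actual_day = "Dimanche"
--             switch_size -= 1
--         elif (actual_day == "Dimanche" and switch_size >= 1):
--             actual_day = "Lundi"
--             switch_size -= 1
--         else :
--             switch_size -= 1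
--     return actual_day
-- ===== SOURCE B (Python) =====
-- _DAYS = ["Lundi", "Mardi", "Mercredi", "Jeudi", "Vendredi", "Samedi", "Dimanche"]
--
-- def switch_week_days(actual_day, switch_size) -> str:
--     if switch_size <= 0 or actual_day not in _DAYS:
--         return actual_day
--     return _DAYS[(_DAYS.index(actual_day) + switch_size) % 7]
-- ===== Notes on version B (the rewrite author's own statement) =====
-- stated objective: faster
-- what changed: Replaced the day-by-day while loop (one step per unit of switch_size) with a single index lookup plus modular arithmetic; unrecognized days are returned unchanged as in A.
import Mathlib
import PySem

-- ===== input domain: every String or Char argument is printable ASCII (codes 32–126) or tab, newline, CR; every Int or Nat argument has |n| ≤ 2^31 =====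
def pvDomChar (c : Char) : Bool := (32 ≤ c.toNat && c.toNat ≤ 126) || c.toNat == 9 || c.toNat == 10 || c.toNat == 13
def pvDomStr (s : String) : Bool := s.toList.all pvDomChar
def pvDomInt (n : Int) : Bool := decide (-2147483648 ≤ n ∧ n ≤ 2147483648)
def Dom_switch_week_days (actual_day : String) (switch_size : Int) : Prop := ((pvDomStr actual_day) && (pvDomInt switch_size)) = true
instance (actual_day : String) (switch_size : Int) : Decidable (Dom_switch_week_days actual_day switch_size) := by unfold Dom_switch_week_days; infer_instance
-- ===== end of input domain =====

-- B replaces A's day-by-day while loop by an index lookup plus one modular addition (O(1) instead of O(switch_size)).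

-- ===== PORT A =====
-- A's while loop decrements switch_size by exactly 1 each iteration (in every branch), so it
-- runs switch_size.toNat times; the fuel parameter below is that count, each step is the
-- loop body (the 'switch_size >= 1' conjuncts are always true inside the loop).
def switch_week_days_loop : String → Nat → String
  | d, 0 => d
  | d, n + 1 =>
    if d = "Lundi" then switch_week_days_loop "Mardi" n
    else if d = "Mardi" then switch_week_days_loop "Mercredi" n
    else if d = "Mercredi" then switch_week_days_loop "Jeudi" n
    else if d = "Jeudi" then switch_week_days_loop "Vendredi" n
    else if d = "Vendredi" then switch_week_days_loop "Samedi" n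
    else if d = "Samedi" then switch_week_days_loop "Dimanche" n
    else if d = "Dimanche" then switch_week_days_loop "Lundi" n
    else switch_week_days_loop d n

def switch_week_days (actual_day : String) (switch_size : Int) : String :=
  switch_week_days_loop actual_day switch_size.toNat

-- ===== PORT B =====
def pvDays : List String := ["Lundi", "Mardi", "Mercredi", "Jeudi", "Vendredi", "Samedi", "Dimanche"]

def switch_week_days_alt (actual_day : String) (switch_size : Int) : String :=
  if switch_size ≤ 0 ∨ actual_day ∉ pvDays then actual_day
  else
    match PySem.List.index? pvDays actual_day with
    | some i => pvDays.getD ((PySem.Int.mod ((i : Int) + switch_size) 7).toNat) actual_day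
        -- the index is always in range in Source B; getD's default is never used
    | none => actual_day

-- ===== PRECONDITION & SPEC =====
def Spec_switch_week_days (actual_day : String) (switch_size : Int) (out : String) : Prop := out = switch_week_days_alt actual_day switch_size
instance (actual_day : String) (switch_size : Int) (out : String) : Decidable (Spec_switch_week_days actual_day switch_size out) := by unfold Spec_switch_week_days; infer_instance

-- ===== CLAIM (what is proved, stated in full; the proofs are below) =====
def Claim_equal_switch_week_days : Prop := ∀ (actual_day : String) (switch_size : Int), Dom_switch_week_days actual_day switch_size → Spec_switch_week_days actual_day switch_size (switch_week_days actual_day switch_size)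

-- ===== LEMMAS AND PROOFS =====

-- an unrecognized day is a fixed point of A's loop
theorem swd_loop_fix (d : String) (h : d ∉ pvDays) : ∀ n, switch_week_days_loop d n = d := by
  intro n
  simp only [pvDays, List.mem_cons, List.not_mem_nil, or_false, not_or] at h
  obtain ⟨h1, h2, h3, h4, h5, h6, h7⟩ := h
  induction n with
  | zero => rfl
  | succ n ih => simp [switch_week_days_loop, h1, h2, h3, h4, h5, h6, h7, ih]

-- starting from each weekday, n loop steps land on the day (index + n) mod 7
theorem swd_cycle (dflt : String) : ∀ n : Nat,
    switch_week_days_loop "Lundi" n = pvDays.getD ((0 + n) % 7) dflt ∧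
    switch_week_days_loop "Mardi" n = pvDays.getD ((1 + n) % 7) dflt ∧
    switch_week_days_loop "Mercredi" n = pvDays.getD ((2 + n) % 7) dflt ∧
    switch_week_days_loop "Jeudi" n = pvDays.getD ((3 + n) % 7) dflt ∧
    switch_week_days_loop "Vendredi" n = pvDays.getD ((4 + n) % 7) dflt ∧
    switch_week_days_loop "Samedi" n = pvDays.getD ((5 + n) % 7) dflt ∧
    switch_week_days_loop "Dimanche" n = pvDays.getD ((6 + n) % 7) dflt := by
  intro n
  induction n with
  | zero => simp [switch_week_days_loop, pvDays]
  | succ n ih =>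
    obtain ⟨h0, h1, h2, h3, h4, h5, h6⟩ := ih
    refine ⟨?_, ?_, ?_, ?_, ?_, ?_, ?_⟩
    · rw [show switch_week_days_loop "Lundi" (n+1) = switch_week_days_loop "Mardi" n from by
        simp [switch_week_days_loop], h1]
      exact congrArg (fun j => pvDays.getD j dflt) (by omega)
    · rw [show switch_week_days_loop "Mardi" (n+1) = switch_week_days_loop "Mercredi" n from by
        simp [switch_week_days_loop], h2]
      exact congrArg (fun j => pvDays.getD j dflt) (by omega)
    · rw [show switch_week_days_loop "Mercredi" (n+1) = switch_week_days_loop "Jeudi" n from by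
        simp [switch_week_days_loop], h3]
      exact congrArg (fun j => pvDays.getD j dflt) (by omega)
    · rw [show switch_week_days_loop "Jeudi" (n+1) = switch_week_days_loop "Vendredi" n from by
        simp [switch_week_days_loop], h4]
      exact congrArg (fun j => pvDays.getD j dflt) (by omega)
    · rw [show switch_week_days_loop "Vendredi" (n+1) = switch_week_days_loop "Samedi" n from by
        simp [switch_week_days_loop], h5]
      exact congrArg (fun j => pvDays.getD j dflt) (by omega)
    · rw [show switch_week_days_loop "Samedi" (n+1) = switch_week_days_loop "Dimanche" n from by
        simp [switch_week_days_loop], h6]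
      exact congrArg (fun j => pvDays.getD j dflt) (by omega)
    · rw [show switch_week_days_loop "Dimanche" (n+1) = switch_week_days_loop "Lundi" n from by
        simp [switch_week_days_loop], h0]
      exact congrArg (fun j => pvDays.getD j dflt) (by omega)

-- one recognized-day case of the main theorem, factored out
theorem swd_case (d : String) (k : Nat) (s : Int) (hpos : 0 < s)
    (hidx : PySem.List.index? pvDays d = some k)
    (hcyc : switch_week_days_loop d s.toNat = pvDays.getD ((k + s.toNat) % 7) d) :
    switch_week_days_loop d s.toNat =
      (match PySem.List.index? pvDays d with
        | some i => pvDays.getD ((PySem.Int.mod ((i : Int) + s) 7).toNat) d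
        | none => d) := by
  rw [hidx, hcyc]
  show pvDays.getD ((k + s.toNat) % 7) d = pvDays.getD ((PySem.Int.mod ((k : Int) + s) 7).toNat) d
  refine congrArg (fun j => pvDays.getD j d) ?_
  rw [PySem.Int.mod_eq_emod_of_pos (by norm_num)]
  omega

-- ===== VERDICT (by name: the statement is the Claim_ definition above) =====
theorem switch_week_days_spec : Claim_equal_switch_week_days := by
  intro d s _
  unfold Spec_switch_week_days switch_week_days switch_week_days_alt
  by_cases hm : d ∈ pvDays
  case neg => simp [hm, swd_loop_fix d hm]
  case pos =>
    by_cases hs : s ≤ 0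
    case pos =>
      have h0 : s.toNat = 0 := by omega
      simp [hs, h0, switch_week_days_loop]
    case neg =>
      have hpos : 0 < s := by omega
      fin_cases hm <;> rw [if_neg (by simp [hs, pvDays])]
      · exact swd_case _ 0 s hpos (by decide) (swd_cycle _ s.toNat).1
      · exact swd_case _ 1 s hpos (by decide) (swd_cycle _ s.toNat).2.1
      · exact swd_case _ 2 s hpos (by decide) (swd_cycle _ s.toNat).2.2.1
      · exact swd_case _ 3 s hpos (by decide) (swd_cycle _ s.toNat).2.2.2.1
      · exact swd_case _ 4 s hpos (by decide) (swd_cycle _ s.toNat).2.2.2.2.1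
      · exact swd_case _ 5 s hpos (by decide) (swd_cycle _ s.toNat).2.2.2.2.2.1
      · exact swd_case _ 6 s hpos (by decide) (swd_cycle _ s.toNat).2.2.2.2.2.2
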